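-- pv_equiv track=rewrite | github.com/kul-group/MAZE-sim | scraps/forcefield.py | shorten_index_list_by_types
-- ===== SOURCE A (Python) =====
-- from itertools import permutations
--
-- def shorten_index_list_by_types(type_index_dict, exclude_atom_type=None, exclude_property_type=None,
--                                 include_property_type=None, case=0):
--     """
--     allow excluding certain property types or only including certain types
--     """
--
--     if exclude_atom_type is not None and exclude_property_type is None:
--         case = 1
--     if exclude_property_type is not None and exclude_atom_type is None:
--         case = 2
--     if exclude_property_type is not None and exclude_atom_type is not None:
--         case = 3
--     if include_property_type is not None:
--         case = 4
--
--     shortened_list = []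
--     for type_list, index_list in type_index_dict.items():
--         if case == 1 and all(single_type not in type_list for single_type in exclude_atom_type):
--             shortened_list.extend(index_list)
--         elif case == 2 and all(list(value) not in exclude_property_type for value in list(permutations(type_list))):
--             shortened_list.extend(index_list)
--         elif case == 3 and all(single_type not in type_list for single_type in exclude_atom_type) and \
--                 all(list(value) not in exclude_property_type for value in list(permutations(type_list))):
--             shortened_list.extend(index_list)
--         elif case == 4 and any(list(value) in include_property_type for value in list(permutations(type_list))):
--             shortened_list.extend(index_list)
--
--     return shortened_list
-- ===== SOURCE B (Python) =====
-- def shorten_index_list_by_types(type_index_dict, exclude_atom_type=None, exclude_property_type=None,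
--                                 include_property_type=None, case=0):
--     """Same filtering, but compares sorted type tuples against precomputed sets
--     instead of enumerating all permutations of every type list."""
--     if include_property_type is not None:
--         allowed = {tuple(sorted(p)) for p in include_property_type}
--         out = []
--         for type_list, index_list in type_index_dict.items():
--             if tuple(sorted(type_list)) in allowed:
--                 out.extend(index_list)
--         return out
--     if exclude_atom_type is None and exclude_property_type is None:
--         return []
--     banned_atoms = set(exclude_atom_type) if exclude_atom_type is not None else set()
--     banned_props = ({tuple(sorted(p)) for p in exclude_property_type}
--                     if exclude_property_type is not None else set())
--     out = []
--     for type_list, index_list in type_index_dict.items():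
--         if any(t in banned_atoms for t in type_list):
--             continue
--         if tuple(sorted(type_list)) in banned_props:
--             continue
--         out.extend(index_list)
--     return out
-- ===== Notes on version B (the rewrite author's own statement) =====
-- stated objective: faster
-- what changed: Instead of enumerating all k! permutations of every type list (and rescanning the exclusion lists for each), B precomputes sets of sorted type tuples (and a set of banned atoms) once and decides each dict entry with a single sorted-key set lookup; Pre_ excludes only the inputs where A raises TypeError (all three filter arguments None while case is 1-4 and the dict is nonempty), where B naturally returns an empty list.
import Mathlib
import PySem

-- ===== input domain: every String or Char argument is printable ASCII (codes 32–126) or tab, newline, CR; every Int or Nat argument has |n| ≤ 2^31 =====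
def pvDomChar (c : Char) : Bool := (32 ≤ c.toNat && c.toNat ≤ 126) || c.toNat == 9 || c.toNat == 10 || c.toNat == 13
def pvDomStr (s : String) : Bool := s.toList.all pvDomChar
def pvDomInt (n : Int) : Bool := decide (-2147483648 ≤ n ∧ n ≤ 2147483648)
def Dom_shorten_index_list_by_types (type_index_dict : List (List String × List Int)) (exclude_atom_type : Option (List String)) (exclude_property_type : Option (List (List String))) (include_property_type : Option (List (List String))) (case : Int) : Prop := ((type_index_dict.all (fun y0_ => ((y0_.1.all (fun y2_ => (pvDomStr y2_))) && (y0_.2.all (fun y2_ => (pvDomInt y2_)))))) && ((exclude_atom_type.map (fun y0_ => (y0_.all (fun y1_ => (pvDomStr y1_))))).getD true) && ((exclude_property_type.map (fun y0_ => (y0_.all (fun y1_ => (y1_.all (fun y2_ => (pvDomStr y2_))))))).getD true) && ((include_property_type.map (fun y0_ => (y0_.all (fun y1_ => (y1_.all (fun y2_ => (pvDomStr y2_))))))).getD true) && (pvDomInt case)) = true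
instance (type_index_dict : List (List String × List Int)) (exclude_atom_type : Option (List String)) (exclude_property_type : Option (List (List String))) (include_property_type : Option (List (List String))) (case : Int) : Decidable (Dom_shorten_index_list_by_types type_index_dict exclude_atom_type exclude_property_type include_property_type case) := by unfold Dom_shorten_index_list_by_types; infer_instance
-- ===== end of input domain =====

-- ===== PORT A =====
-- B replaces A's per-entry enumeration of all permutations by precomputed sets of sorted
-- keys (objective: faster). Equivalence of the RETURN value on Pre_ (A mutates nothing).
def shorten_index_list_by_types (type_index_dict : List (List String × List Int)) (exclude_atom_type : Option (List String)) (exclude_property_type : Option (List (List String))) (include_property_type : Option (List (List String))) (case : Int) : List Int :=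
  -- the four sequential reassignments of `case`
  let case1 : Int := if exclude_atom_type.isSome && exclude_property_type.isNone then 1 else case
  let case2 : Int := if exclude_property_type.isSome && exclude_atom_type.isNone then 2 else case1
  let case3 : Int := if exclude_property_type.isSome && exclude_atom_type.isSome then 3 else case2
  let c : Int := if include_property_type.isSome then 4 else case3
  -- `Option.getD []` stands for the `None` operand: Python raises there, and exactly those
  -- reachable inputs are excluded by Pre_ below
  type_index_dict.foldl (fun shortened_list (entry : List String × List Int) =>
    match entry with
    | (type_list, index_list) =>
    if c == 1 && (exclude_atom_type.getD []).all (fun single_type => !(type_list.contains single_type)) then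
      shortened_list ++ index_list
    else if c == 2 && (PySem.List.permutations type_list type_list.length).all
        (fun value => !((exclude_property_type.getD []).contains value)) then
      shortened_list ++ index_list
    else if c == 3 && (exclude_atom_type.getD []).all (fun single_type => !(type_list.contains single_type)) &&
        (PySem.List.permutations type_list type_list.length).all
          (fun value => !((exclude_property_type.getD []).contains value)) then
      shortened_list ++ index_list
    else if c == 4 && (PySem.List.permutations type_list type_list.length).any
        (fun value => (include_property_type.getD []).contains value) then
      shortened_list ++ index_list
    else shortened_list) []

-- ===== PORT B =====
def shorten_index_list_by_types_alt (type_index_dict : List (List String × List Int)) (exclude_atom_type : Option (List String)) (exclude_property_type : Option (List (List String))) (include_property_type : Option (List (List String))) (case : Int) : List Int :=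
  match include_property_type with
  | some inc =>
      let allowed : PySem.Set (List String) :=
        PySem.Set.ofList (inc.map (fun p => PySem.List.sorted p (fun x => x)))
      type_index_dict.foldl (fun out e =>
        if PySem.Set.contains allowed (PySem.List.sorted e.1 (fun x => x)) then out ++ e.2 else out) []
  | none =>
    match exclude_atom_type, exclude_property_type with
    | none, none => []
    | ea, ep =>
      let bannedAtoms : PySem.Set String := PySem.Set.ofList (ea.getD [])
      let bannedProps : PySem.Set (List String) :=
        PySem.Set.ofList ((ep.getD []).map (fun p => PySem.List.sorted p (fun x => x)))
      type_index_dict.foldl (fun out e =>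
        if e.1.any (fun t => PySem.Set.contains bannedAtoms t) then out
        else if PySem.Set.contains bannedProps (PySem.List.sorted e.1 (fun x => x)) then out
        else out ++ e.2) []

-- ===== PRECONDITION & SPEC =====
-- Pre_ excludes exactly the inputs where A raises TypeError: all three filter arguments are
-- None while `case` is still 1..4 and the dict is nonempty (the loop then iterates over /
-- tests membership in None).
def Pre_shorten_index_list_by_types (type_index_dict : List (List String × List Int)) (exclude_atom_type : Option (List String)) (exclude_property_type : Option (List (List String))) (include_property_type : Option (List (List String))) (case : Int) : Prop :=
  exclude_atom_type = none → exclude_property_type = none → include_property_type = none →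
  type_index_dict ≠ [] → (case ≠ 1 ∧ case ≠ 2 ∧ case ≠ 3 ∧ case ≠ 4)
instance (type_index_dict : List (List String × List Int)) (exclude_atom_type : Option (List String)) (exclude_property_type : Option (List (List String))) (include_property_type : Option (List (List String))) (case : Int) : Decidable (Pre_shorten_index_list_by_types type_index_dict exclude_atom_type exclude_property_type include_property_type case) := by unfold Pre_shorten_index_list_by_types; infer_instance

def pvWitness_shorten_index_list_by_types : (List (List String × List Int)) × Option (List String) × Option (List (List String)) × Option (List (List String)) × Int :=
  ([(["a"], [1, 2])], some ["b"], none, none, 0)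

def Spec_shorten_index_list_by_types (type_index_dict : List (List String × List Int)) (exclude_atom_type : Option (List String)) (exclude_property_type : Option (List (List String))) (include_property_type : Option (List (List String))) (case : Int) (out : List Int) : Prop := out = shorten_index_list_by_types_alt type_index_dict exclude_atom_type exclude_property_type include_property_type case
instance (type_index_dict : List (List String × List Int)) (exclude_atom_type : Option (List String)) (exclude_property_type : Option (List (List String))) (include_property_type : Option (List (List String))) (case : Int) (out : List Int) : Decidable (Spec_shorten_index_list_by_types type_index_dict exclude_atom_type exclude_property_type include_property_type case out) := by unfold Spec_shorten_index_list_by_types; infer_instance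

-- ===== CLAIM (what is proved, stated in full; the proofs are below) =====
def Claim_equal_shorten_index_list_by_types : Prop := ∀ (type_index_dict : List (List String × List Int)) (exclude_atom_type : Option (List String)) (exclude_property_type : Option (List (List String))) (include_property_type : Option (List (List String))) (case : Int), Dom_shorten_index_list_by_types type_index_dict exclude_atom_type exclude_property_type include_property_type case → Pre_shorten_index_list_by_types type_index_dict exclude_atom_type exclude_property_type include_property_type case → Spec_shorten_index_list_by_types type_index_dict exclude_atom_type exclude_property_type include_property_type case (shorten_index_list_by_types type_index_dict exclude_atom_type exclude_property_type include_property_type case)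
-- ===== LEMMAS AND PROOFS =====

-- every rearrangement of xs occurs among itertools.permutations(xs) (converse of
-- PySem.List.perm_of_mem_permutations)
lemma mem_permutations_of_perm {α : Type} [DecidableEq α] : ∀ (p xs : List α), p.Perm xs → p ∈ PySem.List.permutations xs xs.length := by
  intro p
  induction p with
  | nil => intro xs h; rw [h.symm.eq_nil]; simp [PySem.List.permutations_zero]
  | cons a p' ih =>
    intro xs h
    have ha : a ∈ xs := h.subset (List.mem_cons_self ..)
    have hp' : p'.Perm (xs.erase a) := ((List.cons_perm_iff_perm_erase).mp h).2
    have hlen : xs.length = p'.length + 1 := by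
      have := h.length_eq; simpa using this.symm
    rw [hlen, PySem.List.permutations_succ, List.mem_flatMap]
    refine ⟨xs.idxOf a, by simpa [List.mem_range, ← hlen] using List.idxOf_lt_length_of_mem ha, ?_⟩
    rw [List.getElem?_eq_getElem (List.idxOf_lt_length_of_mem ha), List.getElem_idxOf]
    simp only [List.eraseIdx_idxOf_eq_erase a xs]
    have hl2 : p'.length = (xs.erase a).length := by
      rw [List.length_erase_of_mem ha, hlen]; simp
    rw [List.mem_map]
    exact ⟨p', by rw [hl2]; exact ih _ hp', rfl⟩

-- "some permutation of tl is in l"  =  "sorted(tl) is in the set of sorted members of l"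
lemma perm_hit_eq_sorted_mem (tl : List String) (l : List (List String)) :
    (PySem.List.permutations tl tl.length).any (fun value => l.contains value)
    = PySem.Set.contains (PySem.Set.ofList (l.map (fun p => PySem.List.sorted p (fun x => x))))
        (PySem.List.sorted tl (fun x => x)) := by
  rw [Bool.eq_iff_iff]
  simp only [PySem.Set.contains, List.contains_iff_mem, List.any_eq_true,
    PySem.Set.mem_ofList, List.mem_map]
  constructor
  · rintro ⟨v, hv, hvl⟩
    exact ⟨v, hvl, by rw [PySem.List.sorted_id_eq_sorted_id_iff_perm]
                      exact PySem.List.perm_of_mem_permutations hv⟩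
  · rintro ⟨e, hel, he⟩
    exact ⟨e, mem_permutations_of_perm e tl ((PySem.List.sorted_id_eq_sorted_id_iff_perm e tl).mp he), hel⟩

-- "no permutation of tl is in l"  =  "sorted(tl) is not in the set of sorted members of l"
lemma perm_miss_eq_sorted_not_mem (tl : List String) (l : List (List String)) :
    (PySem.List.permutations tl tl.length).all (fun value => !(l.contains value))
    = !(PySem.Set.contains (PySem.Set.ofList (l.map (fun p => PySem.List.sorted p (fun x => x))))
        (PySem.List.sorted tl (fun x => x))) := by
  rw [← perm_hit_eq_sorted_mem tl l, Bool.eq_iff_iff]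
  simp

-- "no member of a occurs in tl"  =  "no element of tl is in set(a)"
lemma atom_all_eq_not_any (tl a : List String) :
    (a.all (fun s => !(tl.contains s)))
    = !(tl.any (fun t => PySem.Set.contains (PySem.Set.ofList a) t)) := by
  rw [Bool.eq_iff_iff]
  simp [PySem.Set.contains, PySem.Set.mem_ofList]
  aesop

-- ===== VERDICT (by name: the statement is the Claim_ definition above) =====
theorem shorten_index_list_by_types_spec : Claim_equal_shorten_index_list_by_types := by
  intro d ea ep ip case _ hpre
  unfold Spec_shorten_index_list_by_types shorten_index_list_by_types shorten_index_list_by_types_alt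
  match ip with
  | some inc =>
    apply PySem.List.foldl_congr_mem
    rintro acc ⟨tl, il⟩ _
    simp only [Option.getD_some]
    rw [← perm_hit_eq_sorted_mem tl inc]
    simp
  | none =>
    match ea, ep with
    | none, none =>
      by_cases hd : d = []
      · subst hd; simp
      · have hc := hpre rfl rfl rfl hd
        obtain ⟨h1, h2, h3, h4⟩ := hc
        calc d.foldl _ ([] : List Int) = d.foldl (fun acc _ => acc) [] := by
              apply PySem.List.foldl_congr_mem
              rintro acc ⟨tl, il⟩ _
              simp [beq_iff_eq, h1, h2, h3, h4]
          _ = [] := PySem.List.foldl_ignore _ _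
    | some a, none =>
      apply PySem.List.foldl_congr_mem
      rintro acc ⟨tl, il⟩ _
      simp only [Option.getD_some, Option.getD_none]
      rw [atom_all_eq_not_any tl a]
      rcases Bool.eq_false_or_eq_true (tl.any (fun t => PySem.Set.contains (PySem.Set.ofList a) t)) with h | h <;>
        rw [h] <;> simp
    | none, some p =>
      apply PySem.List.foldl_congr_mem
      rintro acc ⟨tl, il⟩ _
      simp only [Option.getD_some, Option.getD_none]
      rw [perm_miss_eq_sorted_not_mem tl p]
      rcases Bool.eq_false_or_eq_true (PySem.Set.contains
          (PySem.Set.ofList (p.map (fun q => PySem.List.sorted q (fun x => x))))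
          (PySem.List.sorted tl (fun x => x))) with h | h <;>
        rw [h] <;> simp [PySem.Set.ofList, PySem.Set.contains]
    | some a, some p =>
      apply PySem.List.foldl_congr_mem
      rintro acc ⟨tl, il⟩ _
      simp only [Option.getD_some, Option.getD_none]
      rw [atom_all_eq_not_any tl a, perm_miss_eq_sorted_not_mem tl p]
      rcases Bool.eq_false_or_eq_true (tl.any (fun t => PySem.Set.contains (PySem.Set.ofList a) t)) with h1 | h1 <;>
        rcases Bool.eq_false_or_eq_true (PySem.Set.contains
            (PySem.Set.ofList (p.map (fun q => PySem.List.sorted q (fun x => x))))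
            (PySem.List.sorted tl (fun x => x))) with h2 | h2 <;>
          rw [h1, h2] <;> simp
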